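-- pv_equiv track=rewrite | github.com/LetMeFly666/HospitalAppointment | back/app/baseFunction/model2dict.py | model2dictlist
-- ===== SOURCE A (Python) =====
-- def model2dictlist(model, ignoreList=[]) -> dict:
--     ans = []
--     for m in model:
--         thisDict = {}
--         for key, val in m.items():
--             if key not in ignoreList:
--                 thisDict[key] = val
--         ans.append(thisDict)
--     return ans
-- ===== SOURCE B (Python) =====
-- def _strip(m, ignoreList):
--     d = dict(m)
--     for k in ignoreList:
--         d.pop(k, None)
--     return d
--
--
-- def model2dictlist(model, ignoreList=[]) -> dict:
--     return [_strip(m, ignoreList) for m in model]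
-- ===== Notes on version B (the rewrite author's own statement) =====
-- stated objective: simpler
-- what changed: Instead of filtering each row's items into a fresh dict inside an accumulator loop, B copies each row whole and deletes the ignored keys from the copy (loop over ignoreList with pop), mapping this helper over the rows with a comprehension.
import Mathlib
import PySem

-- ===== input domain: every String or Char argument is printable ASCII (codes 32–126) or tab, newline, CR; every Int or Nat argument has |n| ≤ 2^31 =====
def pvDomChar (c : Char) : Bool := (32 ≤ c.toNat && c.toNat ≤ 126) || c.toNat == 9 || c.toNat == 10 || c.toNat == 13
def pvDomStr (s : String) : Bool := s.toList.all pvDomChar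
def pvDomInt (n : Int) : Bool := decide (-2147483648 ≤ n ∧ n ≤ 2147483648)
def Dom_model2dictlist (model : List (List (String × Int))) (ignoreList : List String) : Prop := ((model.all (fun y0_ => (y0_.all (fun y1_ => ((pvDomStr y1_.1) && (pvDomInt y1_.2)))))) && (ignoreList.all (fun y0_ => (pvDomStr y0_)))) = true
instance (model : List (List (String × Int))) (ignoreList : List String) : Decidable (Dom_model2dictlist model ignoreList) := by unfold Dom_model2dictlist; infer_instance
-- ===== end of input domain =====

-- B copies each row whole and deletes the ignored keys from the copy (pop over ignoreList),
-- instead of filtering each row's items into a fresh dict; equivalence of return values is proved below.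


-- ===== PORT A =====
-- inner loop of A: insert each non-ignored (key, val) of the row dict into a fresh dict
def rowA (ignoreList : List String) (m : List (String × Int)) : PySem.Dict String Int :=
  m.foldl (fun d p => if ignoreList.contains p.1 then d else d.insert p.1 p.2) PySem.Dict.empty

def model2dictlist (model : List (List (String × Int))) (ignoreList : List String) : List (List (String × Int)) :=
  (model.foldl (fun ans m => ans ++ [(rowA ignoreList m).items]) [])

-- ===== PORT B =====
-- d.pop(k, None): pop? and keep the resulting dict, or leave d unchanged when the key is absent
def popDiscard (d : PySem.Dict String Int) (k : String) : PySem.Dict String Int :=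
  match d.pop? k with
  | some r => r.2
  | none => d

-- B's helper _strip: copy the row dict, then pop every ignored key from the copy
def stripRow (m : List (String × Int)) (ignoreList : List String) : PySem.Dict String Int :=
  ignoreList.foldl popDiscard (PySem.Dict.ofList m)

def model2dictlist_alt (model : List (List (String × Int))) (ignoreList : List String) : List (List (String × Int)) :=
  model.map (fun m => (stripRow m ignoreList).items)

-- ===== PRECONDITION & SPEC =====
def Spec_model2dictlist (model : List (List (String × Int))) (ignoreList : List String) (out : List (List (String × Int))) : Prop := out = model2dictlist_alt model ignoreList
instance (model : List (List (String × Int))) (ignoreList : List String) (out : List (List (String × Int))) : Decidable (Spec_model2dictlist model ignoreList out) := by unfold Spec_model2dictlist; infer_instance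

-- ===== CLAIM (what is proved, stated in full; the proofs are below) =====
def Claim_equal_model2dictlist : Prop := ∀ (model : List (List (String × Int))) (ignoreList : List String), Dom_model2dictlist model ignoreList → Spec_model2dictlist model ignoreList (model2dictlist model ignoreList)

-- ===== LEMMAS AND PROOFS =====

theorem popDiscard_eq_erase (d : PySem.Dict String Int) (k : String) :
    popDiscard d k = d.erase k := by
  unfold popDiscard
  unfold PySem.Dict.pop?
  cases h : d.get? k with
  | some v => simp
  | none =>
    simp only [Option.map_none]
    have hc : d.contains k = false := by
      rw [PySem.Dict.contains_eq_isSome_get?, h]; rfl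
    unfold PySem.Dict.contains at hc
    unfold PySem.Dict.erase
    cases d with
    | mk items =>
      simp only [List.any_eq_false] at hc
      congr 1
      symm
      rw [List.filter_eq_self]
      intro p hp
      simpa using hc p hp

theorem filter_out_map_subst {κ ν : Type} [BEq κ] [LawfulBEq κ]
    (items : List (κ × ν)) (k : κ) (v : ν) :
    List.filter (fun p => !p.1 == k) (items.map (fun p => if (p.1 == k) = true then (k, v) else p))
      = List.filter (fun p => !p.1 == k) items := by
  induction items with
  | nil => rfl
  | cons p rest ih =>
    by_cases hp : p.1 = k
    · simp [hp, ih]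
    · simp [hp, ih]

theorem filter_comm_map_subst {κ ν : Type} [BEq κ] [LawfulBEq κ]
    (items : List (κ × ν)) (k a : κ) (v : ν) (hne : a ≠ k) :
    List.filter (fun p => !p.1 == a) (items.map (fun p => if (p.1 == k) = true then (k, v) else p))
      = (List.filter (fun p => !p.1 == a) items).map (fun p => if (p.1 == k) = true then (k, v) else p) := by
  induction items with
  | nil => rfl
  | cons p rest ih =>
    have hfix : ((if (p.1 == k) = true then (k, v) else p).1 == a) = (p.1 == a) := by
      by_cases hp : p.1 = k
      · simp [hp, (by simpa using hne.symm : (k == a) = false)]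
      · simp [hp]
    simp only [List.map_cons, List.filter_cons, hfix]
    cases hpa : (p.1 == a) <;> simp [ih]

theorem erase_insert_self {κ ν : Type} [BEq κ] [LawfulBEq κ]
    (d : PySem.Dict κ ν) (k : κ) (v : ν) :
    (d.insert k v).erase k = d.erase k := by
  unfold PySem.Dict.insert PySem.Dict.erase
  cases d with
  | mk items =>
    split
    · exact congrArg PySem.Dict.mk (filter_out_map_subst items k v)
    · simp

theorem erase_insert_of_ne {κ ν : Type} [BEq κ] [LawfulBEq κ]
    (d : PySem.Dict κ ν) (k a : κ) (v : ν) (hne : a ≠ k) :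
    (d.insert k v).erase a = (d.erase a).insert k v := by
  unfold PySem.Dict.insert PySem.Dict.erase PySem.Dict.contains
  cases d with
  | mk items =>
    by_cases hc : items.any (fun p => p.1 == k) = true
    · have hc' : (items.filter (fun p => !p.1 == a)).any (fun p => p.1 == k) = true := by
        rcases List.any_eq_true.mp hc with ⟨p, hp, hpk⟩
        refine List.any_eq_true.mpr ⟨p, ?_, hpk⟩
        refine List.mem_filter.mpr ⟨hp, ?_⟩
        have hk : p.1 = k := by simpa using hpk
        simp [hk, (by simpa using hne.symm : (k == a) = false)]
      rw [if_pos hc]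
      rw [if_pos hc']
      exact congrArg PySem.Dict.mk (filter_comm_map_subst items k a v hne)
    · have hc' : ¬ ((items.filter (fun p => !p.1 == a)).any (fun p => p.1 == k) = true) := by
        intro hcontra
        rcases List.any_eq_true.mp hcontra with ⟨p, hp, hpk⟩
        exact hc (List.any_eq_true.mpr ⟨p, (List.mem_filter.mp hp).1, hpk⟩)
      rw [if_neg hc]
      rw [if_neg hc', PySem.Dict.mk.injEq, List.filter_append]
      simp [(by simpa using hne.symm : (k == a) = false)]

-- erasing all keys of L distributes over a single insert
theorem foldl_erase_insert {κ ν : Type} [BEq κ] [LawfulBEq κ]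
    (L : List κ) (d : PySem.Dict κ ν) (k : κ) (v : ν) :
    L.foldl PySem.Dict.erase (d.insert k v)
      = if L.contains k then L.foldl PySem.Dict.erase d
        else (L.foldl PySem.Dict.erase d).insert k v := by
  induction L generalizing d with
  | nil => simp
  | cons a t ih =>
    by_cases hak : a = k
    · subst hak
      simp [List.foldl_cons, erase_insert_self]
    · have : (k == a) = false := by simpa using (Ne.symm hak)
      simp only [List.foldl_cons, List.contains_cons, this, Bool.false_or]
      rw [erase_insert_of_ne d k a v hak, ih]

-- the heart: build-then-erase equals filter-then-build, over any starting dict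
theorem strip_eq_rowA_aux {κ ν : Type} [BEq κ] [LawfulBEq κ]
    (m : List (κ × ν)) (L : List κ) (d : PySem.Dict κ ν) :
    L.foldl PySem.Dict.erase (m.foldl (fun d p => d.insert p.1 p.2) d)
      = m.foldl (fun d p => if L.contains p.1 then d else d.insert p.1 p.2)
          (L.foldl PySem.Dict.erase d) := by
  induction m generalizing d with
  | nil => rfl
  | cons p rest ih =>
    simp only [List.foldl_cons]
    rw [ih (d.insert p.1 p.2), foldl_erase_insert]

theorem foldl_erase_empty (L : List String) :
    L.foldl PySem.Dict.erase (PySem.Dict.empty : PySem.Dict String Int) = PySem.Dict.empty := by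
  induction L with
  | nil => rfl
  | cons a t ih => simpa [List.foldl_cons, PySem.Dict.erase, PySem.Dict.empty] using ih

theorem stripRow_eq_rowA (m : List (String × Int)) (L : List String) :
    stripRow m L = rowA L m := by
  unfold stripRow rowA
  have hpop : popDiscard = PySem.Dict.erase := funext fun d => funext fun k => popDiscard_eq_erase d k
  rw [hpop]
  have hof : PySem.Dict.ofList m = m.foldl (fun d (p : String × Int) => d.insert p.1 p.2) PySem.Dict.empty := rfl
  rw [hof, strip_eq_rowA_aux, foldl_erase_empty]

-- ===== VERDICT (by name: the statement is the Claim_ definition above) =====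
theorem model2dictlist_spec : Claim_equal_model2dictlist := by
  intro model ignoreList _
  unfold Spec_model2dictlist model2dictlist model2dictlist_alt
  rw [PySem.List.foldl_append_singleton_eq_map]
  exact List.map_congr_left fun m _ => by rw [stripRow_eq_rowA]
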